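-- pv_equiv track=rewrite | github.com/AleksVassiliev/AdventOfCode | 2015/day19/day19.py | generateMolecules
-- ===== SOURCE A (Python) =====
-- def generateMolecules(pattern, replacements):
--     res = set()
--     for idx, elem in enumerate(pattern):
--         if elem in replacements:
--             repl = replacements[elem]
--             for r in repl:
--                 mol = pattern[:]
--                 mol[idx] = r
--                 res.add("".join(mol))
--     return res
-- ===== SOURCE B (Python) =====
-- def generateMolecules(pattern, replacements):
--     # Pass 1: one joined string plus cumulative character offsets of each token.
--     joined = "".join(pattern)
--     offs = [0]
--     for elem in pattern:
--         offs.append(offs[-1] + len(elem))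
--     # Pass 2: build each molecule by two slices of the joined string + the replacement.
--     res = set()
--     for idx, elem in enumerate(pattern):
--         if elem in replacements:
--             head = joined[:offs[idx]]
--             tail = joined[offs[idx + 1]:]
--             for r in replacements[elem]:
--                 res.add(head + r + tail)
--     return res
-- ===== Notes on version B (the rewrite author's own statement) =====
-- stated objective: alternative
-- what changed: A copies the whole token list and re-joins it for every single replacement; B joins the pattern once, precomputes cumulative character offsets of each token, and builds each molecule from two slices of the joined string plus the replacement.
import Mathlib
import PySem

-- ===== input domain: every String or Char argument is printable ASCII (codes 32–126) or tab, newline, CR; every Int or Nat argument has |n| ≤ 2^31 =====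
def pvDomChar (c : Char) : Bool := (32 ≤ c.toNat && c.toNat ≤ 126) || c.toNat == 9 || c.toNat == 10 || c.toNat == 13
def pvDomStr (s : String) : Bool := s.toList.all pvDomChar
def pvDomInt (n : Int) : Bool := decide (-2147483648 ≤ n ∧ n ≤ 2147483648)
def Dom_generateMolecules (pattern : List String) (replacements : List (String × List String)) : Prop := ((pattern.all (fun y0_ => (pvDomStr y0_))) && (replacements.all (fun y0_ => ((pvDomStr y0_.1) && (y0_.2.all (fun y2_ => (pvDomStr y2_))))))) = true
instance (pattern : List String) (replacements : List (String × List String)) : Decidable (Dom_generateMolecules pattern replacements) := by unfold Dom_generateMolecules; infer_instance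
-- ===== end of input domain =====

-- B replaces A's per-candidate list copy + full re-join with precomputed cumulative
-- prefix/suffix join tables (alternative decomposition; return value only, no mutation).


-- ===== PORT A =====
-- replacements is a Python dict ported as an association list: membership / lookup = first match.
def generateMolecules (pattern : List String) (replacements : List (String × List String)) : List String :=
  (PySem.List.enumerate pattern).foldl (fun res p =>
    match replacements.find? (fun q => q.1 == p.2) with
    | some q =>
        -- mol = pattern[:]; mol[idx] = r; res.add("".join(mol))
        q.2.foldl (fun res r =>
          PySem.Set.add res (PySem.Str.join "" (pattern.set p.1.toNat r))) res
    | none => res) []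

-- ===== PORT B =====
-- Python `a + b` on strings, exact: String.ofList/toList are kernel-transparent.
def pvCat (a b : String) : String := String.ofList (a.toList ++ b.toList)

-- offs = [0]; for elem in pattern: offs.append(offs[-1] + len(elem))
def pvOffsets : List String → Int → List Int
  | [], acc => [acc]
  | s :: rest, acc => acc :: pvOffsets rest (acc + PySem.Str.len s)

def generateMolecules_alt (pattern : List String) (replacements : List (String × List String)) : List String :=
  let joined := PySem.Str.join "" pattern
  let offs := pvOffsets pattern 0
  (PySem.List.enumerate pattern).foldl (fun res p =>
    match replacements.find? (fun q => q.1 == p.2) with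
    | some q =>
        let head := PySem.Str.slice joined none (some (PySem.List.pyGetD offs p.1 0))
        let tail := PySem.Str.slice joined (some (PySem.List.pyGetD offs (p.1 + 1) 0)) none
        q.2.foldl (fun res r => PySem.Set.add res (pvCat head (pvCat r tail))) res
    | none => res) []

-- ===== PRECONDITION & SPEC =====
def Spec_generateMolecules (pattern : List String) (replacements : List (String × List String)) (out : List String) : Prop := out = generateMolecules_alt pattern replacements
instance (pattern : List String) (replacements : List (String × List String)) (out : List String) : Decidable (Spec_generateMolecules pattern replacements out) := by unfold Spec_generateMolecules; infer_instance

-- ===== CLAIM (what is proved, stated in full; the proofs are below) =====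
def Claim_equal_generateMolecules : Prop := ∀ (pattern : List String) (replacements : List (String × List String)), Dom_generateMolecules pattern replacements → Spec_generateMolecules pattern replacements (generateMolecules pattern replacements)

-- ===== LEMMAS AND PROOFS =====

theorem pv_chars_join_nil (parts : List (List Char)) :
    PySem.Chars.join [] parts = parts.flatten := by
  induction parts with
  | nil => simp [PySem.Chars.join_nil]
  | cons a rest ih =>
    cases rest with
    | nil => simp [PySem.Chars.join_singleton]
    | cons b r => simp [PySem.Chars.join_cons_cons] at *; simp [ih]

theorem pv_str_join_toList (l : List String) :
    (PySem.Str.join "" l).toList = (l.map String.toList).flatten := by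
  simp only [PySem.Str.join, String.toList_empty, String.toList_ofList]
  exact pv_chars_join_nil _

@[simp] theorem pvCat_toList (a b : String) : (pvCat a b).toList = a.toList ++ b.toList := by
  simp [pvCat]

theorem pvOffsets_getD (l : List String) : ∀ (acc : Int) (k : Nat), k ≤ l.length →
    (pvOffsets l acc).getD k 0 = acc + (((l.take k).map String.toList).flatten.length : Int) := by
  induction l with
  | nil =>
    intro acc k hk
    have : k = 0 := Nat.le_zero.mp (by simpa using hk)
    subst this; simp [pvOffsets]
  | cons s rest ih =>
    intro acc k hk
    cases k with
    | zero => simp [pvOffsets]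
    | succ k =>
      simp only [pvOffsets, List.getD_cons_succ, List.take_succ_cons, List.map_cons,
        List.flatten_cons]
      rw [ih (acc + PySem.Str.len s) k (by simpa using hk), PySem.Str.len_eq,
        List.length_append]
      push_cast
      ring

theorem pv_main (pattern : List String) (k : Nat) (hk : k < pattern.length) (r : String) :
    PySem.Str.join "" (pattern.set k r) =
      pvCat (PySem.Str.slice (PySem.Str.join "" pattern) none
          (some (PySem.List.pyGetD (pvOffsets pattern 0) (k : Int) 0)))
        (pvCat r (PySem.Str.slice (PySem.Str.join "" pattern)
          (some (PySem.List.pyGetD (pvOffsets pattern 0) ((k : Int) + 1) 0)) none)) := by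
  apply String.toList_inj.mp
  have h1 : ((k : Int) + 1) = ((k + 1 : Nat) : Int) := by push_cast; ring
  rw [h1, PySem.List.pyGetD_natCast, PySem.List.pyGetD_natCast,
    pvOffsets_getD pattern 0 k (le_of_lt hk), pvOffsets_getD pattern 0 (k + 1) hk]
  simp only [pvCat_toList, PySem.Str.toList_slice, PySem.Chars.slice_eq_listSlice,
    pv_str_join_toList]
  rw [PySem.List.slice_to _ (by positivity), PySem.List.slice_from _ (by positivity)]
  have htn : ∀ (m : Nat), ((0 : Int) + (m : Int)).toNat = m := by intro m; omega
  rw [htn, htn]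
  -- split the joined flatten at the token boundaries k and k+1
  conv_lhs => rw [List.set_eq_take_cons_drop r hk]
  have hsplit : ∀ (j : Nat),
      (pattern.map String.toList).flatten
        = ((pattern.take j).map String.toList).flatten ++ ((pattern.drop j).map String.toList).flatten := by
    intro j
    rw [← List.flatten_append, ← List.map_append, List.take_append_drop]
  have htake : List.take ((pattern.take k).map String.toList).flatten.length
      (pattern.map String.toList).flatten = ((pattern.take k).map String.toList).flatten := by
    rw [hsplit k]; exact List.take_left
  have hdrop : List.drop ((pattern.take (k + 1)).map String.toList).flatten.length
      (pattern.map String.toList).flatten = ((pattern.drop (k + 1)).map String.toList).flatten := by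
    rw [hsplit (k + 1)]; exact List.drop_left
  rw [htake, hdrop]
  simp [List.map_append]

-- ===== VERDICT (by name: the statement is the Claim_ definition above) =====
theorem generateMolecules_spec : Claim_equal_generateMolecules := by
  intro pattern replacements _
  unfold Spec_generateMolecules generateMolecules generateMolecules_alt
  apply PySem.List.foldl_congr_mem
  intro acc p hp
  obtain ⟨k, hk, rfl⟩ := (PySem.List.mem_enumerate_iff _ _ _).mp hp
  cases hfind : replacements.find? (fun q => q.1 == pattern[k]) with
  | none => simp
  | some q =>
    simp only
    apply PySem.List.foldl_congr_mem
    intro acc' r _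
    have : ((0 : Int) + (k : Int)).toNat = k := by omega
    rw [this, pv_main pattern k hk r]
    norm_num
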